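-- pv_equiv track=rewrite | github.com/TesfaAsmara/colonel_blotto | plot_player1_win_cond.py | count_operators
-- ===== SOURCE A (Python) =====
-- def count_operators(processed_combinations):
--     counts = {'>': 0, '=': 0, '<': 0}
--     for combo in processed_combinations:
--         for val in combo:
--             if val > 0:
--                 counts['>'] += 1
--             elif val == 0:
--                 counts['='] += 1
--             else:
--                 counts['<'] += 1
--     return counts
-- ===== SOURCE B (Python) =====
-- def count_operators(processed_combinations):
--     vals = [v for combo in processed_combinations for v in combo]
--     greater = sum(1 for v in vals if v > 0)
--     equal = sum(1 for v in vals if v == 0)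
--     less = sum(1 for v in vals if v < 0)
--     return {'>': greater, '=': equal, '<': less}
-- ===== Notes on version B (the rewrite author's own statement) =====
-- stated objective: alternative
-- what changed: Replaces the single stateful if/elif/else pass updating a dict in nested loops by flattening all values once and computing each bucket with its own independent filtering scan.
import Mathlib
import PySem

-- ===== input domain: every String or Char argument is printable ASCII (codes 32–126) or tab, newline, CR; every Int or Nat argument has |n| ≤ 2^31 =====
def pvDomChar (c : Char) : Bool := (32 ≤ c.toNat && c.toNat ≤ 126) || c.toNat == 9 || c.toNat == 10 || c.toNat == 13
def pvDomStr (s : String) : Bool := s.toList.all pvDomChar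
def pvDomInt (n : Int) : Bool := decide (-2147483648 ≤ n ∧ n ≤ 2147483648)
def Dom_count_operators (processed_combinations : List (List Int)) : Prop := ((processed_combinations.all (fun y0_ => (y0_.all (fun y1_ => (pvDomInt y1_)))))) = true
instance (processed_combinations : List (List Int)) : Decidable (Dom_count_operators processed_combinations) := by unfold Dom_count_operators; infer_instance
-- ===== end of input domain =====

-- B replaces A's single stateful if/elif/else dict-updating pass by a flatten plus three independent filtering scans (alternative decomposition, same cost).

-- ===== PORT A =====
-- the body of A's inner loop: one value updates the running counts dict
def pvStep_count_operators (cs : PySem.Dict String Int) (val : Int) : PySem.Dict String Int :=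
  if val > 0 then cs.modify ">" 0 (· + 1)
  else if val = 0 then cs.modify "=" 0 (· + 1)
  else cs.modify "<" 0 (· + 1)

def count_operators (processed_combinations : List (List Int)) : List (String × Int) :=
  let counts : PySem.Dict String Int := PySem.Dict.ofList [(">", 0), ("=", 0), ("<", 0)]
  let counts := processed_combinations.foldl
    (fun cs combo => combo.foldl pvStep_count_operators cs) counts
  counts.items

-- ===== PORT B =====
def count_operators_alt (processed_combinations : List (List Int)) : List (String × Int) :=
  let vals := processed_combinations.flatten
  let greater : Int := (vals.countP (fun v => decide (0 < v)) : Nat)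
  let equal : Int := (vals.countP (fun v => v == 0) : Nat)
  let less : Int := (vals.countP (fun v => decide (v < 0)) : Nat)
  [(">", greater), ("=", equal), ("<", less)]

-- ===== PRECONDITION & SPEC =====
def Spec_count_operators (processed_combinations : List (List Int)) (out : List (String × Int)) : Prop := out = count_operators_alt processed_combinations
instance (processed_combinations : List (List Int)) (out : List (String × Int)) : Decidable (Spec_count_operators processed_combinations out) := by unfold Spec_count_operators; infer_instance

-- ===== CLAIM (what is proved, stated in full; the proofs are below) =====
def Claim_equal_count_operators : Prop := ∀ (processed_combinations : List (List Int)), Dom_count_operators processed_combinations → Spec_count_operators processed_combinations (count_operators processed_combinations)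

-- ===== LEMMAS AND PROOFS =====

-- A's inner loop over one combo, from an arbitrary canonical counts dict
lemma pv_inner_loop (vs : List Int) (g e l : Int) :
    vs.foldl pvStep_count_operators (PySem.Dict.mk [(">", g), ("=", e), ("<", l)]) =
    PySem.Dict.mk [(">", g + (vs.countP (fun v => decide (0 < v)) : Nat)),
                   ("=", e + (vs.countP (fun v => v == 0) : Nat)),
                   ("<", l + (vs.countP (fun v => decide (v < 0)) : Nat))] := by
  induction vs generalizing g e l with
  | nil => simp
  | cons v vs ih =>
    by_cases h1 : v > 0
    · have : pvStep_count_operators (PySem.Dict.mk [(">", g), ("=", e), ("<", l)]) v =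
          PySem.Dict.mk [(">", g + 1), ("=", e), ("<", l)] := by
        simp [pvStep_count_operators, h1, PySem.Dict.modify, PySem.Dict.insert,
          PySem.Dict.getD, PySem.Dict.get?]
      simp only [List.foldl_cons, this, ih]
      simp [List.countP_cons, not_lt.mpr (le_of_lt h1), Int.ne_of_gt h1]
      omega
    · by_cases h2 : v = 0
      · have : pvStep_count_operators (PySem.Dict.mk [(">", g), ("=", e), ("<", l)]) v =
            PySem.Dict.mk [(">", g), ("=", e + 1), ("<", l)] := by
          simp [pvStep_count_operators, h2, PySem.Dict.modify, PySem.Dict.insert,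
            PySem.Dict.getD, PySem.Dict.get?]
        simp only [List.foldl_cons, this, ih]
        simp [h2]
        omega
      · have : pvStep_count_operators (PySem.Dict.mk [(">", g), ("=", e), ("<", l)]) v =
            PySem.Dict.mk [(">", g), ("=", e), ("<", l + 1)] := by
          simp [pvStep_count_operators, h1, h2, PySem.Dict.modify, PySem.Dict.insert,
            PySem.Dict.getD, PySem.Dict.get?]
        have hlt : v < 0 := by omega
        simp only [List.foldl_cons, this, ih]
        simp [h1, h2, hlt]
        omega

-- A's outer loop equals three counts over the flattened values
lemma pv_outer_loop (pcs : List (List Int)) (g e l : Int) :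
    pcs.foldl (fun cs combo => combo.foldl pvStep_count_operators cs)
      (PySem.Dict.mk [(">", g), ("=", e), ("<", l)]) =
    PySem.Dict.mk [(">", g + (pcs.flatten.countP (fun v => decide (0 < v)) : Nat)),
                   ("=", e + (pcs.flatten.countP (fun v => v == 0) : Nat)),
                   ("<", l + (pcs.flatten.countP (fun v => decide (v < 0)) : Nat))] := by
  induction pcs generalizing g e l with
  | nil => simp
  | cons combo rest ih =>
    simp only [List.foldl_cons, pv_inner_loop, ih, List.flatten_cons, List.countP_append]
    simp only [PySem.Dict.mk.injEq, List.cons.injEq, Prod.mk.injEq, and_true, true_and]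
    refine ⟨?_, ?_, ?_⟩ <;> (push_cast; ring)

-- ===== VERDICT (by name: the statement is the Claim_ definition above) =====
theorem count_operators_spec : Claim_equal_count_operators := by
  intro pcs _
  show count_operators pcs = count_operators_alt pcs
  have h0 : PySem.Dict.ofList [((">" : String), (0 : Int)), ("=", 0), ("<", 0)] =
      PySem.Dict.mk [(">", 0), ("=", 0), ("<", 0)] := by decide
  simp only [count_operators, count_operators_alt, h0, pv_outer_loop]
  simp
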